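-- pv_equiv track=rewrite | github.com/MrKrishnabhagat/Gplan | updated.py | create_l_shaped_block
-- ===== SOURCE A (Python) =====
-- def create_l_shaped_block(length, width):
--     """Create an L-shaped block with given dimensions"""
--     if length < 3 or width < 3:
--         return None
--
--     block = [[1 for _ in range(width)] for _ in range(length)]
--     corner_height = length // 2
--     corner_width = width // 2
--
--     for i in range(corner_height):
--         for j in range(width - corner_width, width):
--             block[i][j] = 0
--
--     return block
-- ===== SOURCE B (Python) =====
-- def create_l_shaped_block(length, width):
--     """Create an L-shaped block with given dimensions"""
--     if length < 3 or width < 3: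
--         return None
--     corner_height = length // 2
--     corner_width = width // 2
--     top_row = [1] * (width - corner_width) + [0] * corner_width
--     full_row = [1] * width
--     return [list(top_row) for _ in range(corner_height)] + \
--            [list(full_row) for _ in range(length - corner_height)]
-- ===== Notes on version B (the rewrite author's own statement) =====
-- stated objective: alternative
-- what changed: Builds the two distinct row templates once with list multiplication ([1]*(width-cw)+[0]*cw and [1]*width) and concatenates copies of them, instead of A's fill-everything-with-ones grid followed by a nested per-cell loop overwriting the corner; there is no per-cell conditional or overwrite at all.
import Mathlib
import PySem

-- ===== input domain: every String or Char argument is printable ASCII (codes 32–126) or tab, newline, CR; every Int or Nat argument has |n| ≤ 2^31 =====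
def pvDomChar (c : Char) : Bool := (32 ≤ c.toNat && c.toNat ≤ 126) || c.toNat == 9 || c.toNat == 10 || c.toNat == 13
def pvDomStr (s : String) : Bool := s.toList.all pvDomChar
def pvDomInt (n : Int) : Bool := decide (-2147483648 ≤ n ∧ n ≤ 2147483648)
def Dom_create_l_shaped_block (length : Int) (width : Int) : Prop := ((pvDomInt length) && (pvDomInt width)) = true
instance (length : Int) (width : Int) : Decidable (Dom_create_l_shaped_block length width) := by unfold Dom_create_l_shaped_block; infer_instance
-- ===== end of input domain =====

-- B builds the two row templates once by list multiplication and concatenates copies,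
-- instead of A's fill-all-ones grid plus nested per-cell overwrite loop; objective: alternative.

-- ===== PORT A =====
def create_l_shaped_block (length : Int) (width : Int) : Option (List (List Int)) :=
  if length < 3 ∨ width < 3 then none
  else
    let block : List (List Int) :=
      (PySem.List.pyRange 0 length 1).map (fun _ =>
        (PySem.List.pyRange 0 width 1).map (fun _ => (1 : Int)))
    let corner_height := PySem.Int.floordiv length 2
    let corner_width := PySem.Int.floordiv width 2
    let block :=
      (PySem.List.pyRange 0 corner_height 1).foldl (fun b i =>
        PySem.List.pySetD b i
          ((PySem.List.pyRange (width - corner_width) width 1).foldl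
            (fun r j => PySem.List.pySetD r j (0 : Int))
            (PySem.List.pyGetD b i []))) block
    some block

-- ===== PORT B =====
def create_l_shaped_block_alt (length : Int) (width : Int) : Option (List (List Int)) :=
  if length < 3 ∨ width < 3 then none
  else
    let corner_height := PySem.Int.floordiv length 2
    let corner_width := PySem.Int.floordiv width 2
    let top_row := PySem.List.pyRepeat [(1 : Int)] (width - corner_width)
                    ++ PySem.List.pyRepeat [(0 : Int)] corner_width
    let full_row := PySem.List.pyRepeat [(1 : Int)] width
    some ((PySem.List.pyRange 0 corner_height 1).map (fun _ => top_row)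
          ++ (PySem.List.pyRange 0 (length - corner_height) 1).map (fun _ => full_row))

-- ===== PRECONDITION & SPEC =====
def Spec_create_l_shaped_block (length : Int) (width : Int) (out : Option (List (List Int))) : Prop := out = create_l_shaped_block_alt length width
instance (length : Int) (width : Int) (out : Option (List (List Int))) : Decidable (Spec_create_l_shaped_block length width out) := by unfold Spec_create_l_shaped_block; infer_instance

-- ===== CLAIM =====
def Claim_equal_create_l_shaped_block : Prop := ∀ (length : Int) (width : Int), Dom_create_l_shaped_block length width → Spec_create_l_shaped_block length width (create_l_shaped_block length width)

-- ===== LEMMAS AND PROOFS =====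

-- a fold of in-place updates 'b[i] = v(b[i])' preserves length
theorem foldl_pySetD_length {α : Type} (v : α → α) (d : α) (l : List Int) (blk : List α) :
    (l.foldl (fun b i => PySem.List.pySetD b i (v (PySem.List.pyGetD b i d))) blk).length
      = blk.length := by
  induction l generalizing blk with
  | nil => rfl
  | cons x xs ih => simp [List.foldl, ih, PySem.List.length_pySetD]

-- pointwise description of the fold of in-place updates 'b[i] = v(b[i])' over range(a, c)
theorem foldl_pySetD_getElem? {α : Type} (v : α → α) (d : α) (a c : Int) (ha : 0 ≤ a)
    (blk : List α) (k : Nat) (hk : k < blk.length) :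
    ((PySem.List.pyRange a c 1).foldl
        (fun b i => PySem.List.pySetD b i (v (PySem.List.pyGetD b i d))) blk)[k]?
      = some (if a ≤ (k : Int) ∧ (k : Int) < c then v blk[k] else blk[k]) := by
  by_cases hac : c ≤ a
  · rw [PySem.List.pyRange_one_eq_nil hac]
    simp only [List.foldl_nil]
    rw [List.getElem?_eq_getElem hk]
    congr 1
    rw [if_neg (by omega)]
  · push_neg at hac
    rw [PySem.List.pyRange_one_cons hac]
    simp only [List.foldl_cons]
    have ha1 : (0:Int) ≤ a + 1 := by omega
    set blk' := PySem.List.pySetD blk a (v (PySem.List.pyGetD blk a d)) with hblk'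
    have hlen' : blk'.length = blk.length := PySem.List.length_pySetD ..
    have hk' : k < blk'.length := by omega
    rw [foldl_pySetD_getElem? v d (a+1) c ha1 blk' k hk']
    have hset : blk' = blk.set a.toNat (v (PySem.List.pyGetD blk a d)) :=
      PySem.List.pySetD_of_nonneg _ _ ha
    have hgd : PySem.List.pyGetD blk a d = blk.getD a.toNat d :=
      PySem.List.pyGetD_of_nonneg _ _ ha
    simp only [hset, List.getElem_set]
    by_cases hka : a.toNat = k
    · subst hka
      rw [if_pos rfl, hgd, List.getD_eq_getElem _ _ (by omega)]
      rw [if_neg (by omega), if_pos (by omega)]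
    · rw [if_neg hka]
      congr 1
      by_cases h1 : a + 1 ≤ (k : Int) ∧ (k : Int) < c
      · rw [if_pos h1, if_pos (by omega)]
      · rw [if_neg h1, if_neg (by omega)]
termination_by (c - a).toNat
decreasing_by omega

theorem create_l_shaped_block_spec : Claim_equal_create_l_shaped_block := by
  intro length width _
  unfold Spec_create_l_shaped_block create_l_shaped_block create_l_shaped_block_alt
  by_cases hguard : length < 3 ∨ width < 3
  · simp [hguard]
  · rw [if_neg hguard, if_neg hguard]
    push_neg at hguard
    obtain ⟨hl, hw⟩ := hguard
    obtain ⟨L, rfl⟩ : ∃ L : Nat, length = (L : Int) := ⟨length.toNat, by omega⟩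
    obtain ⟨W, rfl⟩ : ∃ W : Nat, width = (W : Int) := ⟨width.toNat, by omega⟩
    simp only
    congr 1
    set ch := PySem.Int.floordiv (L : Int) 2 with hch
    set cw := PySem.Int.floordiv (W : Int) 2 with hcw
    have hch_eq : ch = ((L / 2 : Nat) : Int) := by
      rw [hch, PySem.Int.floordiv_eq_ediv_of_pos (by omega)]
      omega
    have hcw_eq : cw = ((W / 2 : Nat) : Int) := by
      rw [hcw, PySem.Int.floordiv_eq_ediv_of_pos (by omega)]
      omega
    have hch_le : ch ≤ (L : Int) := by rw [hch_eq]; exact_mod_cast Nat.cast_le.mpr (Nat.div_le_self L 2)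
    have hcw_le : cw ≤ (W : Int) := by rw [hcw_eq]; exact_mod_cast Nat.cast_le.mpr (Nat.div_le_self W 2)
    have hch0 : (0:Int) ≤ ch := by rw [hch_eq]; positivity
    have hcw0 : (0:Int) ≤ cw := by rw [hcw_eq]; positivity
    set top : List Int := PySem.List.pyRepeat [(1 : Int)] ((W : Int) - cw)
                    ++ PySem.List.pyRepeat [(0 : Int)] cw with htop
    set full : List Int := PySem.List.pyRepeat [(1 : Int)] (W : Int) with hfull
    have htop' : top = List.replicate ((W : Int) - cw).toNat 1 ++ List.replicate cw.toNat 0 := by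
      rw [htop, PySem.List.pyRepeat_singleton, PySem.List.pyRepeat_singleton]
    have hfull' : full = List.replicate W 1 := by
      rw [hfull, PySem.List.pyRepeat_singleton]
      norm_num
    have htoplen : top.length = W := by
      rw [htop']; simp; omega
    have hfulllen : full.length = W := by rw [hfull']; simp
    set row : List Int := (PySem.List.pyRange 0 (W : Int) 1).map (fun _ => (1 : Int)) with hrow
    set blk : List (List Int) := (PySem.List.pyRange 0 (L : Int) 1).map (fun _ => row) with hblk
    have hrowlen : row.length = W := by
      rw [hrow]; simp [PySem.List.length_pyRange_one]
    have hblklen : blk.length = L := by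
      rw [hblk]; simp [PySem.List.length_pyRange_one]
    have hrow_full : row = full := by
      rw [hrow, hfull', List.map_const']
      congr 1
      simp [PySem.List.length_pyRange_one]
    set v : List Int → List Int := fun r =>
      (PySem.List.pyRange ((W : Int) - cw) (W : Int) 1).foldl
        (fun r j => PySem.List.pySetD r j (0 : Int)) r with hv
    have hinner : ∀ (r : List Int),
        v r = (PySem.List.pyRange ((W : Int) - cw) (W : Int) 1).foldl
          (fun b i => PySem.List.pySetD b i ((fun _ => (0:Int)) (PySem.List.pyGetD b i 0))) r :=
      fun r => rfl
    have hvrow : v row = top := by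
      apply List.ext_getElem?
      intro m
      by_cases hm : m < W
      · rw [hinner row,
          foldl_pySetD_getElem? (fun _ => (0:Int)) 0 ((W:Int) - cw) (W:Int) (by omega) row m (by omega)]
        have hrowm? : row[m]? = some 1 := by
          rw [hrow, PySem.List.getElem?_map_pyRange_zero _ W m (by omega)]
        rw [List.getElem?_eq_getElem (by omega : m < row.length)] at hrowm?
        rw [Option.some.inj hrowm?, htop']
        by_cases hc : (W:Int) - cw ≤ (m:Int) ∧ (m:Int) < (W:Int)
        · rw [if_pos hc, List.getElem?_append_right (by simp; omega)]
          simp only [List.length_replicate]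
          rw [List.getElem?_replicate, if_pos (by omega)]
        · rw [if_neg hc, List.getElem?_append_left (by simp; omega)]
          rw [List.getElem?_replicate, if_pos (by omega)]
      · rw [List.getElem?_eq_none (by
          rw [hinner row, foldl_pySetD_length (fun _ => (0:Int)) 0 _ row]; omega)]
        rw [List.getElem?_eq_none (by rw [htoplen]; omega)]
    have hfoldshape :
        (fun (b : List (List Int)) (i : Int) =>
            PySem.List.pySetD b i
              ((PySem.List.pyRange ((W : Int) - cw) (W : Int) 1).foldl
                (fun r j => PySem.List.pySetD r j (0 : Int))
                (PySem.List.pyGetD b i [])))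
          = (fun b i => PySem.List.pySetD b i (v (PySem.List.pyGetD b i ([] : List Int)))) := rfl
    apply List.ext_getElem?
    intro k
    have hBlen1 : ((PySem.List.pyRange 0 ch 1).map (fun _ => top)).length = ch.toNat := by
      simp [PySem.List.length_pyRange_one]
    by_cases hk : k < L
    · rw [hfoldshape,
        foldl_pySetD_getElem? v ([] : List Int) 0 ch (le_refl 0) blk k (by omega)]
      have hblkk : blk[k]'(by omega) = row := by
        have h : blk[k]? = some row := by
          rw [hblk, PySem.List.getElem?_map_pyRange_zero _ L k (by omega)]
        rw [List.getElem?_eq_getElem (by omega : k < blk.length)] at h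
        exact Option.some.inj h
      simp only [hblkk]
      have hchtoNat : ch.toNat = L / 2 := by rw [hch_eq]; omega
      have hLc : (L : Int) - ch = ((L - L / 2 : Nat) : Int) := by
        rw [hch_eq]; omega
      by_cases hkch : (0:Int) ≤ (k : Int) ∧ (k:Int) < ch
      · rw [if_pos hkch, hvrow,
          List.getElem?_append_left (by rw [hBlen1]; omega), hch_eq,
          PySem.List.getElem?_map_pyRange_zero _ (L / 2) k (by
            have := hkch.2; rw [hch_eq] at this; omega)]
      · rw [if_neg hkch, hrow_full,
          List.getElem?_append_right (by rw [hBlen1]; omega), hBlen1, hLc,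
          PySem.List.getElem?_map_pyRange_zero _ (L - L / 2) (k - ch.toNat) (by omega)]
    · rw [hfoldshape, List.getElem?_eq_none (by rw [foldl_pySetD_length]; omega),
        List.getElem?_eq_none (by simp [PySem.List.length_pyRange_one]; omega)]
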